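-- pv_equiv track=rewrite | github.com/lizaigaoge550/multi-table | read_data.py | generate_multi_tags
-- ===== SOURCE A (Python) =====
-- import copy
--
-- def generate_index(inital,s,count):
--     if count == 0:
--         s.append(copy.copy(inital))
--         return
--     for i in range(2):
--         inital.append(i)
--         generate_index(inital,s,count-1)
--         del inital[-1]
--
-- def no_pat(tag,index):
--     s = []
--     for i in range(len(tag[index])):
--         if tag[index][i] != 'verb':
--             s.append(tag[index][i])
--     return s
--
-- def generate_multi_tags(tags):
--     #tag中可能有pat所以要拆分
--     #获取pat的索引
--     pat_index = []
--     index_count = 0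
--     for tag_index in range(len(tags)):
--         if 'verb' in tags[tag_index]:
--             pat_index.append(tag_index)
--             index_count += 1
--     if index_count == 0:
--         return [tags]
--     #产生索引
--     s = []
--     generate_index([],s,index_count)
--     data = []
--
--     for s_index in range(len(s)):
--         tag_copy = copy.copy(tags)
--         for index,value in zip(pat_index,s[s_index]):
--             if value == 0:
--                 tag_copy[index] = []
--             else:
--                 tag_copy[index] = no_pat(tag_copy,index)
--         tag_copy = list(filter(lambda a:a!=[],tag_copy))
--         data.append(copy.deepcopy(tag_copy))
--     return data
-- ===== SOURCE B (Python) =====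
-- import copy
--
-- def generate_multi_tags(tags):
--     # single structural recursion building all verb-split variants directly;
--     # no index lists and no binary-sequence generation
--     if not any('verb' in t for t in tags):
--         return [tags]
--
--     def go(rest):
--         if not rest:
--             return [[]]
--         head = rest[0]
--         tails = go(rest[1:])
--         if 'verb' in head:
--             kept = [x for x in head if x != 'verb']
--             if not kept:
--                 return tails + tails
--             return tails + [[kept] + t for t in tails]
--         if not head:
--             return tails
--         return [[head] + t for t in tails]
--
--     return [copy.deepcopy(c) for c in go(tags)]
-- ===== Notes on version B (the rewrite author's own statement) =====
-- stated objective: simpler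
-- what changed: Replaces the recursive binary index-sequence generator plus the index-based 0/1 assignment-and-filter loop with a single structural recursion over the tag list that builds all variants directly (doubling/extending the suffix results at each verb-containing tag).
import Mathlib
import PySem

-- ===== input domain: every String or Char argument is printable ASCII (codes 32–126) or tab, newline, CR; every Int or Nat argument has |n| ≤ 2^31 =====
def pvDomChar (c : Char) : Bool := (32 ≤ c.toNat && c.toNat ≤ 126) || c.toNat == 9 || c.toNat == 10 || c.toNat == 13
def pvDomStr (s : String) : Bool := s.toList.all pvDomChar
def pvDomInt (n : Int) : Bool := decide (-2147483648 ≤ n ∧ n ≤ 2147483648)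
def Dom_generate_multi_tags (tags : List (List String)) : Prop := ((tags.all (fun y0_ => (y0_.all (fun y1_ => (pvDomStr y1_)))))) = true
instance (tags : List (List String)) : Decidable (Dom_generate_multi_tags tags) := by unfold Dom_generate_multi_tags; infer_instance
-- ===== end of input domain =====

-- B replaces the recursive binary-index generation plus index-based assignment loop
-- with one structural recursion over the tag list that builds all variants directly (objective: simpler).
-- Equivalence is about return values; like A, B returns fresh (deep-copied) result lists.

-- ===== PORT A =====
-- generate_index(inital, s, count): returns the updated s (Python mutates s in place)
def generate_index (inital : List Int) (s : List (List Int)) : Nat → List (List Int)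
  | 0 => s ++ [inital]
  | Nat.succ n =>
      -- for i in range(2): inital.append(i); recurse; del inital[-1]
      let s1 := generate_index (inital ++ [0]) s n
      generate_index (inital ++ [1]) s1 n

-- no_pat(tag, index): loop over range(len(tag[index])) collecting elements != 'verb'.
-- index is always in range at A's call sites, so getD is exact there.
def no_pat (tag : List (List String)) (index : Nat) : List String :=
  let l := tag.getD index []
  (List.range l.length).foldl
    (fun s i => if l.getD i "" ≠ "verb" then s ++ [l.getD i ""] else s) []

def generate_multi_tags (tags : List (List String)) : List (List (List String)) :=
  let pat_index : List Nat := (List.range tags.length).foldl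
      (fun acc i => if "verb" ∈ tags.getD i [] then acc ++ [i] else acc) []
  -- index_count always equals len(pat_index)
  if pat_index.length = 0 then [tags]
  else
    let s := generate_index [] [] pat_index.length
    s.foldl (fun data bits =>
      let tag_copy := (pat_index.zip bits).foldl
          (fun tc iv =>
            if iv.2 = 0 then tc.set iv.1 ([] : List String)
            else tc.set iv.1 (no_pat tc iv.1)) tags
      data ++ [tag_copy.filter (fun a => a ≠ [])]) []

-- ===== PORT B =====
def gmtGo : List (List String) → List (List (List String))
  | [] => [[]]
  | head :: more =>
      let tails := gmtGo more
      if "verb" ∈ head then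
        let kept := head.filter (fun x => x ≠ "verb")
        if kept = [] then tails ++ tails
        else tails ++ tails.map (fun t => kept :: t)
      else if head = [] then tails
      else tails.map (fun t => head :: t)

def generate_multi_tags_alt (tags : List (List String)) : List (List (List String)) :=
  if tags.any (fun t => "verb" ∈ t) then gmtGo tags else [tags]

-- ===== PRECONDITION & SPEC =====
def Spec_generate_multi_tags (tags : List (List String)) (out : List (List (List String))) : Prop := out = generate_multi_tags_alt tags
instance (tags : List (List String)) (out : List (List (List String))) : Decidable (Spec_generate_multi_tags tags out) := by unfold Spec_generate_multi_tags; infer_instance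

-- ===== CLAIM (what is proved, stated in full; the proofs are below) =====
def Claim_equal_generate_multi_tags : Prop := ∀ (tags : List (List String)), Dom_generate_multi_tags tags → Spec_generate_multi_tags tags (generate_multi_tags tags)

-- ===== LEMMAS AND PROOFS =====

-- reference objects used only by the proofs
def allBits : Nat → List (List Int)
  | 0 => [[]]
  | Nat.succ n => (allBits n).map (fun b => 0 :: b) ++ (allBits n).map (fun b => 1 :: b)

def patIdx : List (List String) → List Nat
  | [] => []
  | h :: t => if "verb" ∈ h then 0 :: (patIdx t).map (· + 1) else (patIdx t).map (· + 1)

def applyStruct : List (List String) → List Int → List (List String)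
  | [], _ => []
  | h :: t, bits =>
      if "verb" ∈ h then
        match bits with
        | [] => h :: applyStruct t []
        | b :: bs => (if b = 0 then [] else h.filter (fun x => x ≠ "verb")) :: applyStruct t bs
      else h :: applyStruct t bits

theorem generate_index_eq (n : Nat) : ∀ (inital : List Int) (s : List (List Int)),
    generate_index inital s n = s ++ (allBits n).map (fun b => inital ++ b) := by
  induction n with
  | zero => intro inital s; simp [generate_index, allBits]
  | succ n ih =>
      intro inital s
      simp [generate_index, allBits, ih, List.map_map, Function.comp_def, List.append_assoc]

theorem range_getD_filter (l : List String) :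
    ((List.range l.length).filter (fun i => decide (l.getD i "" ≠ "verb"))).map
        (fun i => l.getD i "") = l.filter (fun x => x ≠ "verb") := by
  induction l with
  | nil => rfl
  | cons x xs ih =>
      rw [List.length_cons, List.range_succ_eq_map, List.filter_cons]
      by_cases hx : x = "verb" <;>
        simp only [List.getD_cons_zero, List.getD_cons_succ, hx, decide_not, List.filter_map,
          Function.comp_def, List.map_map, List.filter_cons, ne_eq, decide_true,
          Bool.not_true, Bool.false_eq_true, if_false, decide_false, Bool.not_false, if_true,
          List.map_cons, not_true_eq_false, not_false_eq_true] <;>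
        simp only [decide_not, List.getD_eq_getElem?_getD] at ih ⊢ <;> simp [ih]

theorem no_pat_eq (tag : List (List String)) (index : Nat) :
    no_pat tag index = (tag.getD index []).filter (fun x => x ≠ "verb") := by
  unfold no_pat
  generalize tag.getD index [] = l
  rw [PySem.List.foldl_append_ite (fun i => l.getD i "" ≠ "verb") (fun i => l.getD i "")]
  simpa using range_getD_filter l

-- the inner-loop step function of A
def astep (tc : List (List String)) (iv : Nat × Int) : List (List String) :=
  if iv.2 = 0 then tc.set iv.1 ([] : List String) else tc.set iv.1 (no_pat tc iv.1)

theorem astep_shift (pairs : List (Nat × Int)) :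
    ∀ (h : List String) (t : List (List String)),
    (pairs.map (Prod.map (· + 1) id)).foldl astep (h :: t) = h :: pairs.foldl astep t := by
  induction pairs with
  | nil => intro h t; rfl
  | cons p ps ih =>
      intro h t
      obtain ⟨i, v⟩ := p
      have hs : astep (h :: t) (i + 1, v) = h :: astep t (i, v) := by
        by_cases hv : v = 0 <;> simp [astep, hv, no_pat_eq, List.set_cons_succ]
      simp only [List.map_cons, List.foldl_cons, Prod.map, id, hs, ih]

theorem applyStruct_nil_bits (t : List (List String)) : applyStruct t [] = t := by
  induction t with
  | nil => rfl
  | cons h s ih => by_cases hv : "verb" ∈ h <;> simp [applyStruct, hv, ih]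

theorem foldl_astep_eq (tags : List (List String)) :
    ∀ bits : List Int, ((patIdx tags).zip bits).foldl astep tags = applyStruct tags bits := by
  induction tags with
  | nil => intro bits; simp [patIdx, applyStruct]
  | cons h t ih =>
      intro bits
      by_cases hv : "verb" ∈ h
      · cases bits with
        | nil => simp [patIdx, hv, applyStruct, applyStruct_nil_bits]
        | cons b bs =>
            simp only [patIdx, if_pos hv, List.zip_cons_cons, List.foldl_cons,
              List.zip_map_left]
            have hstep : astep (h :: t) (0, b) =
                (if b = 0 then [] else h.filter (fun x => x ≠ "verb")) :: t := by
              by_cases hb : b = 0 <;> simp [astep, hb, no_pat_eq]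
            rw [hstep, astep_shift, ih]
            simp [applyStruct, hv]
      · simp only [patIdx, if_neg hv, List.zip_map_left]
        rw [astep_shift, ih]
        simp [applyStruct, hv]

theorem main_map_eq (tags : List (List String)) :
    (allBits (patIdx tags).length).map
      (fun bits => (applyStruct tags bits).filter (fun a => a ≠ [])) = gmtGo tags := by
  induction tags with
  | nil => simp [patIdx, allBits, applyStruct, gmtGo]
  | cons h t ih =>
      by_cases hv : "verb" ∈ h
      · have h0 : ∀ bs : List Int, applyStruct (h :: t) (0 :: bs) = [] :: applyStruct t bs := by
          intro bs; simp [applyStruct, hv]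
        have h1 : ∀ bs : List Int, applyStruct (h :: t) ((1 : Int) :: bs) =
            h.filter (fun x => x ≠ "verb") :: applyStruct t bs := by
          intro bs; simp [applyStruct, hv]
        by_cases hk : h.filter (fun x => x ≠ "verb") = []
        · have h1' : ∀ bs : List Int, applyStruct (h :: t) ((1 : Int) :: bs) =
              [] :: applyStruct t bs := by intro bs; rw [h1, hk]
          simp only [patIdx, if_pos hv, List.length_cons, List.length_map, allBits,
            List.map_append, List.map_map, Function.comp_def, h0, h1']
          have hdrop : (fun x : List Int =>
                (([] : List String) :: applyStruct t x).filter (fun a => decide (a ≠ []))) =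
              fun x : List Int => (applyStruct t x).filter (fun a => decide (a ≠ [])) := by
            funext x; simp
          rw [hdrop, ih]
          simp only [gmtGo]
          rw [if_pos hv, if_pos hk]
        · have hcons : ∀ X : List (List String),
              (h.filter (fun x => x ≠ "verb") :: X).filter (fun a => decide (a ≠ [])) =
              h.filter (fun x => x ≠ "verb") :: X.filter (fun a => decide (a ≠ [])) := by
            intro X
            rw [List.filter_cons, if_pos (by simpa using hk)]
          simp only [patIdx, if_pos hv, List.length_cons, List.length_map, allBits,
            List.map_append, List.map_map, Function.comp_def, h0, h1, hcons]
          have hdrop : (fun x : List Int =>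
                (([] : List String) :: applyStruct t x).filter (fun a => decide (a ≠ []))) =
              fun x : List Int => (applyStruct t x).filter (fun a => decide (a ≠ [])) := by
            funext x; simp
          rw [hdrop, show (fun x : List Int => h.filter (fun x => x ≠ "verb") ::
                (applyStruct t x).filter (fun a => decide (a ≠ []))) =
              (fun l => h.filter (fun x => x ≠ "verb") :: l) ∘
                (fun x : List Int => (applyStruct t x).filter (fun a => decide (a ≠ [])))
              from rfl, ← List.map_map, ih]
          simp only [gmtGo]
          rw [if_pos hv, if_neg hk]
      · have hstep : ∀ bits : List Int, applyStruct (h :: t) bits = h :: applyStruct t bits := by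
          intro bits; simp [applyStruct, hv]
        by_cases hn : h = []
        · have hdropH : ∀ X : List (List String),
              (h :: X).filter (fun a => decide (a ≠ [])) = X.filter (fun a => decide (a ≠ [])) := by
            intro X; simp [hn]
          simp only [patIdx, if_neg hv, List.length_map, hstep, hdropH]
          rw [ih]
          simp only [gmtGo]
          rw [if_neg hv, if_pos hn]
        · have hcons : ∀ X : List (List String),
              (h :: X).filter (fun a => decide (a ≠ [])) =
              h :: X.filter (fun a => decide (a ≠ [])) := by
            intro X
            rw [List.filter_cons, if_pos (by simpa using hn)]
          simp only [patIdx, if_neg hv, List.length_map, hstep, hcons]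
          rw [show (fun x : List Int =>
                h :: (applyStruct t x).filter (fun a => decide (a ≠ []))) =
              (fun l => h :: l) ∘
                (fun x : List Int => (applyStruct t x).filter (fun a => decide (a ≠ [])))
              from rfl, ← List.map_map, ih]
          simp only [gmtGo]
          rw [if_neg hv, if_neg hn]

theorem range_filter_patIdx (tags : List (List String)) :
    (List.range tags.length).filter (fun i => decide ("verb" ∈ tags.getD i [])) = patIdx tags := by
  induction tags with
  | nil => rfl
  | cons h t ih =>
      rw [List.length_cons, List.range_succ_eq_map, List.filter_cons]
      by_cases hv : "verb" ∈ h <;>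
        simp only [List.getD_cons_zero, List.getD_cons_succ, hv, decide_true, decide_false,
          if_true, if_false, List.filter_map, Function.comp_def, patIdx, Nat.succ_eq_add_one,
          Bool.false_eq_true] <;>
        (simp only [List.getD_eq_getElem?_getD] at ih ⊢; rw [ih])

theorem patIdx_eq (tags : List (List String)) :
    (List.range tags.length).foldl
      (fun acc i => if "verb" ∈ tags.getD i [] then acc ++ [i] else acc) [] = patIdx tags := by
  rw [PySem.List.foldl_append_ite_eq_filter]
  simpa using range_filter_patIdx tags

theorem patIdx_nil_iff (tags : List (List String)) :
    patIdx tags = [] ↔ tags.any (fun t => "verb" ∈ t) = false := by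
  induction tags with
  | nil => simp [patIdx]
  | cons h t ih => by_cases hv : "verb" ∈ h <;> simp [patIdx, hv, ih]

-- ===== VERDICT (by name: the statement is the Claim_ definition above) =====
theorem generate_multi_tags_spec : Claim_equal_generate_multi_tags := by
  intro tags _
  unfold Spec_generate_multi_tags generate_multi_tags generate_multi_tags_alt
  simp only [patIdx_eq]
  by_cases hnil : patIdx tags = []
  · rw [hnil]
    simp [(patIdx_nil_iff tags).1 hnil]
  · have hany : tags.any (fun t => "verb" ∈ t) = true := by
      rcases Bool.eq_false_or_eq_true (tags.any (fun t => "verb" ∈ t)) with h | h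
      · exact h
      · exact absurd ((patIdx_nil_iff tags).2 h) hnil
    rw [if_neg (by simpa [List.length_eq_zero_iff] using hnil), hany, if_pos rfl]
    rw [generate_index_eq]
    simp only [List.nil_append, List.map_id']
    rw [show (fun tc (iv : Nat × Int) =>
          if iv.2 = 0 then tc.set iv.1 ([] : List String)
          else tc.set iv.1 (no_pat tc iv.1)) = astep from rfl]
    rw [PySem.List.foldl_append_singleton_eq_map
      (fun bits => (((patIdx tags).zip bits).foldl astep tags).filter (fun a => a ≠ []))]
    rw [List.nil_append,
      List.map_congr_left (fun b _ => by rw [foldl_astep_eq] :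
        ∀ b ∈ allBits (patIdx tags).length,
          (((patIdx tags).zip b).foldl astep tags).filter (fun a => a ≠ []) =
          (applyStruct tags b).filter (fun a => a ≠ []))]
    exact main_map_eq tags
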